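-- pv_equiv track=rewrite | github.com/MikeJiahaoXu/MetaGen | dataset/hfss/utils.py | get_ractangle
-- ===== SOURCE A (Python) =====
-- def get_ractangle(bitmap, method):
-- 	"""
-- 	Extract rectangles from binary bitmap
-- 	"""
-- 	rectangles = {}
-- 	rect_id = 0
--
-- 	# Simple method: loop through each row and extract continuous pixels as a rectangle
-- 	for y, row in enumerate(bitmap):
-- 		x = 0
-- 		while x < len(row):
-- 			if row[x] == 1:
-- 				start_x = x
-- 				while x < len(row) and row[x] == 1:
-- 					x += 1
-- 				rectangles[rect_id] = [{
-- 					'x': start_x,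
-- 					'y': y,
-- 					'width': x - start_x,
-- 					'height': 1
-- 				}]
-- 				rect_id += 1
-- 			else:
-- 				x += 1
--
-- 	return rectangles
-- ===== SOURCE B (Python) =====
-- def get_ractangle(bitmap, method):
--     """
--     Extract rectangles from binary bitmap
--     """
--     # Staged transition-pairing: per row, detect 0->1 boundaries (run starts) and
--     # 1->0 boundaries (run ends) against the shifted row, pair them with zip,
--     # collect all runs, then build the dict in one numbering pass.
--     runs = []
--     for y, row in enumerate(bitmap):
--         starts = [x for x, (p, v) in enumerate(zip([0] + row, row)) if v == 1 and p != 1]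
--         ends = [x + 1 for x, (v, n) in enumerate(zip(row, row[1:] + [0])) if v == 1 and n != 1]
--         runs += [(y, s, e) for s, e in zip(starts, ends)]
--     return {i: [{'x': s, 'y': y, 'width': e - s, 'height': 1}]
--             for i, (y, s, e) in enumerate(runs)}
-- ===== Notes on version B (the rewrite author's own statement) =====
-- stated objective: alternative
-- what changed: A's nested two-pointer while loops are replaced by staged transition pairing: per row, 0->1 boundaries (run starts) and 1->0 boundaries (run ends) are detected by filtering the row zipped with its shifted copy, paired with zip into runs, and the dict is built in one final numbering pass over the collected runs.
import Mathlib
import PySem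

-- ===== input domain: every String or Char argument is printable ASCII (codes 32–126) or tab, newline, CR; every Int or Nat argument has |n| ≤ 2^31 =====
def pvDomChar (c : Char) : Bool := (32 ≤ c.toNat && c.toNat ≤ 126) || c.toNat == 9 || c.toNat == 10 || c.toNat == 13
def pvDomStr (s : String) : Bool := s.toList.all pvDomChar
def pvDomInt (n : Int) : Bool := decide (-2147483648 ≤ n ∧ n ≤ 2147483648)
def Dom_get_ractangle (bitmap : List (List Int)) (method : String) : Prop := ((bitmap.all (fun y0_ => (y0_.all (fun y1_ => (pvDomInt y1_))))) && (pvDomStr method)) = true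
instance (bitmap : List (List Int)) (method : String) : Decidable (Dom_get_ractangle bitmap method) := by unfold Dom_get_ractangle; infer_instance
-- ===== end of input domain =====

-- B replaces A's nested run-scanning while loops by staged transition pairing (detect
-- 0->1 and 1->0 boundaries per row by zipping with the shifted row, pair with zip,
-- then number all runs in one final pass); return values are proved equal on all inputs.

-- ===== PORT A =====

/-- inner `while x < len(row) and row[x] == 1` of A: length of the leading run of 1s. -/
def pvLead1 : List Int → Nat
  | [] => 0
  | v :: t => if v == 1 then pvLead1 t + 1 else 0

/-- outer `while x < len(row)` of A, over the remaining suffix of the row;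
    returns the updated (rect_id, rectangles). -/
def pvAScan (y : Int) (rest : List Int) (x : Int) (rid : Int)
    (acc : PySem.Dict Int (List (List (String × Int)))) :
    Int × PySem.Dict Int (List (List (String × Int))) :=
  match rest with
  | [] => (rid, acc)
  | v :: t =>
    if hv : v == 1 then
      -- start_x = x; the inner while advances x past the run of 1s
      pvAScan y (List.drop (pvLead1 (v :: t)) (v :: t)) (x + (pvLead1 (v :: t) : Int)) (rid + 1)
        (acc.insert rid [[("x", x), ("y", y), ("width", (pvLead1 (v :: t) : Int)), ("height", 1)]])
    else
      pvAScan y t (x + 1) rid acc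
termination_by rest.length
decreasing_by
  · have h1 : pvLead1 (v :: t) = pvLead1 t + 1 := by simp [pvLead1, hv]
    simp only [List.length_drop, List.length_cons, h1]
    omega
  · simp

def get_ractangle (bitmap : List (List Int)) (method : String) :
    List (Int × List (List (String × Int))) :=
  (bitmap.foldl
    (fun (st : Int × Int × PySem.Dict Int (List (List (String × Int)))) row =>
      let (rid', acc') := pvAScan st.1 row 0 st.2.1 st.2.2
      (st.1 + 1, rid', acc'))
    (0, 0, PySem.Dict.empty)).2.2.items

-- ===== PORT B =====

/-- `[x for x, (p, v) in enumerate(zip([0] + row, row)) if v == 1 and p != 1]` -/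
def pvStarts (row : List Int) : List Int :=
  ((PySem.List.enumerate (List.zip ((0 : Int) :: row) row)).filter
    (fun q => q.2.2 == 1 && q.2.1 != 1)).map (fun q => q.1)

/-- `[x + 1 for x, (v, n) in enumerate(zip(row, row[1:] + [0])) if v == 1 and n != 1]`
    (`row[1:]` ported with PySem.List.slice). -/
def pvEnds (row : List Int) : List Int :=
  ((PySem.List.enumerate (List.zip row (PySem.List.slice row (some 1) none ++ [0]))).filter
    (fun q => q.2.1 == 1 && q.2.2 != 1)).map (fun q => q.1 + 1)

def get_ractangle_alt (bitmap : List (List Int)) (method : String) :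
    List (Int × List (List (String × Int))) :=
  -- runs = []; for y, row in enumerate(bitmap): runs += [(y, s, e) for s, e in zip(starts, ends)]
  let runs : List (Int × Int × Int) :=
    (PySem.List.enumerate bitmap).foldl
      (fun acc p =>
        acc ++ (List.zip (pvStarts p.2) (pvEnds p.2)).map (fun se => (p.1, se.1, se.2))) []
  -- {i: [{'x': s, 'y': y, 'width': e - s, 'height': 1}] for i, (y, s, e) in enumerate(runs)}
  ((PySem.List.enumerate runs).foldl
    (fun (d : PySem.Dict Int (List (List (String × Int)))) q =>
      d.insert q.1 [[("x", q.2.2.1), ("y", q.2.1), ("width", q.2.2.2 - q.2.2.1), ("height", 1)]])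
    PySem.Dict.empty).items

-- ===== PRECONDITION & SPEC =====
def Spec_get_ractangle (bitmap : List (List Int)) (method : String) (out : List (Int × List (List (String × Int)))) : Prop := out = get_ractangle_alt bitmap method
instance (bitmap : List (List Int)) (method : String) (out : List (Int × List (List (String × Int)))) : Decidable (Spec_get_ractangle bitmap method out) := by unfold Spec_get_ractangle; infer_instance

-- ===== CLAIM (what is proved, stated in full; the proofs are below) =====
def Claim_equal_get_ractangle : Prop := ∀ (bitmap : List (List Int)) (method : String), Dom_get_ractangle bitmap method → Spec_get_ractangle bitmap method (get_ractangle bitmap method)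

-- ===== LEMMAS AND PROOFS =====

/-- specification runs of a row: (start, end) of each maximal run of 1s, A-shaped. -/
def pvRunsRec (rest : List Int) (x : Int) : List (Int × Int) :=
  match rest with
  | [] => []
  | v :: t =>
    if hv : v == 1 then
      (x, x + (pvLead1 (v :: t) : Int)) ::
        pvRunsRec (List.drop (pvLead1 (v :: t)) (v :: t)) (x + (pvLead1 (v :: t) : Int))
    else
      pvRunsRec t (x + 1)
termination_by rest.length
decreasing_by
  · have h1 : pvLead1 (v :: t) = pvLead1 t + 1 := by simp [pvLead1, hv]
    simp only [List.length_drop, List.length_cons, h1]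
    omega
  · simp

def pvRect3 (t : Int × Int × Int) : List (List (String × Int)) :=
  [[("x", t.2.1), ("y", t.1), ("width", t.2.2 - t.2.1), ("height", 1)]]

def pvInsRuns (st : Int × PySem.Dict Int (List (List (String × Int))))
    (rs : List (Int × Int × Int)) : Int × PySem.Dict Int (List (List (String × Int))) :=
  rs.foldl (fun st t => (st.1 + 1, st.2.insert st.1 (pvRect3 t))) st

/-- A's row scan = insert the row's runs one by one. -/
theorem pvAScan_eq (y : Int) : ∀ (rest : List Int) (x rid : Int)
    (acc : PySem.Dict Int (List (List (String × Int)))),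
    pvAScan y rest x rid acc =
      pvInsRuns (rid, acc) ((pvRunsRec rest x).map (fun se => (y, se.1, se.2))) := by
  intro rest
  induction hn : rest.length using Nat.strong_induction_on generalizing rest with
  | _ k ih =>
  intro x rid acc
  match rest with
  | [] => simp [pvAScan, pvRunsRec, pvInsRuns]
  | v :: t =>
    rw [pvAScan, pvRunsRec]
    by_cases hv : v = 1
    · subst hv
      simp only [show ((1 : Int) == 1) = true from rfl, dite_true, List.map_cons]
      have hl : pvLead1 ((1 : Int) :: t) = pvLead1 t + 1 := by simp [pvLead1]
      have hlt : (List.drop (pvLead1 ((1:Int) :: t)) ((1:Int) :: t)).length < k := by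
        subst hn; simp [hl]
      rw [ih _ hlt _ rfl]
      simp only [pvInsRuns, List.foldl_cons, pvRect3]
      have : x + (pvLead1 ((1:Int) :: t) : Int) - x = (pvLead1 ((1:Int) :: t) : Int) := by ring
      rw [this]
    · have hv' : (v == 1) = false := by simp [hv]
      simp only [hv', Bool.false_eq_true, dite_false]
      have hlt : t.length < k := by subst hn; simp
      rw [ih _ hlt _ rfl]

/-- recursive characterisation of pvStarts: state = previous pixel value. -/
def pvStartsRec (p x : Int) : List Int → List Int
  | [] => []
  | v :: t => if v == 1 && !(p == 1) then x :: pvStartsRec v (x + 1) t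
              else pvStartsRec v (x + 1) t

/-- recursive characterisation of pvEnds. -/
def pvEndsRec (x : Int) : List Int → List Int
  | [] => []
  | v :: t => if v == 1 && !((t.headD 0) == 1) then (x + 1) :: pvEndsRec (x + 1) t
              else pvEndsRec (x + 1) t

theorem pvStarts_gen (p : Int) : ∀ (row : List Int) (x : Int),
    ((PySem.List.enumerate (List.zip (p :: row) row) x).filter
      (fun q => q.2.2 == 1 && q.2.1 != 1)).map (fun q => q.1) = pvStartsRec p x row := by
  intro row
  induction row generalizing p with
  | nil => intro x; simp [pvStartsRec, PySem.List.enumerate]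
  | cons v t ih =>
    intro x
    rw [show List.zip (p :: v :: t) (v :: t) = (p, v) :: List.zip (v :: t) t from rfl,
        PySem.List.enumerate_cons]
    rw [pvStartsRec]
    by_cases hc : (v == 1 && !(p == 1)) = true
    · rw [if_pos hc]
      have : ((v == 1) && (p != 1)) = true := by simpa [bne] using hc
      simp only [List.filter_cons, this, if_true, List.map_cons]
      rw [ih v (x + 1)]
    · rw [if_neg hc]
      have : ((v == 1) && (p != 1)) = false := by
        simpa [bne] using (Bool.of_not_eq_true hc)
      simp only [List.filter_cons, this, Bool.false_eq_true, if_false]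
      rw [ih v (x + 1)]

theorem pvEnds_gen : ∀ (row : List Int) (x : Int),
    ((PySem.List.enumerate (List.zip row (row.tail ++ [0])) x).filter
      (fun q => q.2.1 == 1 && q.2.2 != 1)).map (fun q => q.1 + 1) = pvEndsRec x row := by
  intro row
  induction row with
  | nil => intro x; simp [pvEndsRec, PySem.List.enumerate]
  | cons v t ih =>
    intro x
    have hz : List.zip (v :: t) ((v :: t).tail ++ [0]) =
        (v, t.headD 0) :: List.zip t (t.tail ++ [0]) := by
      cases t with
      | nil => rfl
      | cons w t' => rfl
    rw [hz, PySem.List.enumerate_cons, pvEndsRec]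
    by_cases hc : (v == 1 && !((t.headD 0) == 1)) = true
    · have : ((v == 1) && ((t.headD 0) != 1)) = true := by simpa [bne] using hc
      simp only [List.filter_cons, this, if_true, List.map_cons]
      rw [ih (x + 1), if_pos hc]
    · have : ((v == 1) && ((t.headD 0) != 1)) = false := by
        simpa [bne] using (Bool.of_not_eq_true hc)
      simp only [List.filter_cons, this, Bool.false_eq_true, if_false, if_neg hc]
      rw [ih (x + 1)]

/-- leading-run lemma for starts: inside a run (state 1) nothing is emitted. -/
theorem pvStartsRec_run : ∀ (t : List Int) (x : Int),
    pvStartsRec 1 x t = pvStartsRec 1 (x + (pvLead1 t : Int)) (t.drop (pvLead1 t)) := by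
  intro t
  induction t with
  | nil => intro x; simp [pvLead1]
  | cons v t' ih =>
    intro x
    by_cases hv : v = 1
    · subst hv
      have hl : pvLead1 ((1 : Int) :: t') = pvLead1 t' + 1 := by simp [pvLead1]
      rw [pvStartsRec]
      simp only [show (((1:Int) == 1) && !((1:Int) == 1)) = false from rfl,
        Bool.false_eq_true, if_false]
      rw [ih (x + 1), hl, List.drop_succ_cons]
      congr 1
      push_cast; ring
    · have hl : pvLead1 (v :: t') = 0 := by simp [pvLead1, hv]
      rw [hl]; simp

/-- state irrelevance when the next pixel is not 1 (or the row ends). -/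
theorem pvStartsRec_state (p q x : Int) (rest : List Int)
    (h : rest.headD 0 ≠ 1) : pvStartsRec p x rest = pvStartsRec q x rest := by
  cases rest with
  | nil => rfl
  | cons v t =>
    have hv : (v == 1) = false := by
      simp only [List.headD_cons] at h; simp [h]
    simp [pvStartsRec, hv]

theorem pvLead1_drop_head : ∀ (t : List Int), (t.drop (pvLead1 t)).headD 0 ≠ 1 := by
  intro t
  induction t with
  | nil => simp
  | cons v t' ih =>
    by_cases hv : v = 1
    · subst hv
      have hl : pvLead1 ((1 : Int) :: t') = pvLead1 t' + 1 := by simp [pvLead1]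
      rw [hl, List.drop_succ_cons]; exact ih
    · have hl : pvLead1 (v :: t') = 0 := by simp [pvLead1, hv]
      rw [hl]; simpa using hv

/-- leading-run lemma for ends: a row starting with 1 emits x + (run length) first. -/
theorem pvEndsRec_run : ∀ (rest : List Int) (x : Int), rest.headD 0 = 1 →
    pvEndsRec x rest =
      (x + (pvLead1 rest : Int)) :: pvEndsRec (x + (pvLead1 rest : Int)) (rest.drop (pvLead1 rest)) := by
  intro rest
  induction rest with
  | nil => intro x h; simp at h
  | cons v t ih =>
    intro x h
    simp only [List.headD_cons] at h
    subst h
    have hl : pvLead1 ((1 : Int) :: t) = pvLead1 t + 1 := by simp [pvLead1]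
    rw [hl, List.drop_succ_cons]
    by_cases ht : t.headD 0 = 1
    · rw [pvEndsRec]
      have ht' : t.head?.getD 0 = 1 := by simpa [List.headD_eq_head?_getD] using ht
      have hc : (((1:Int) == 1) && !((t.headD 0) == 1)) = false := by simp [List.headD_eq_head?_getD, ht']
      rw [hc]
      simp only [Bool.false_eq_true, if_false]
      rw [ih (x + 1) ht]
      have hx : x + 1 + (pvLead1 t : Int) = x + ((pvLead1 t + 1 : Nat) : Int) := by
        push_cast; ring
      rw [hx]
    · rw [pvEndsRec]
      have ht' : ¬ t.head?.getD 0 = 1 := by simpa [List.headD_eq_head?_getD] using ht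
      have hc : (((1:Int) == 1) && !((t.headD 0) == 1)) = true := by simp [List.headD_eq_head?_getD, ht']
      rw [hc]
      have hl0 : pvLead1 t = 0 := by
        cases t with
        | nil => rfl
        | cons w t' => simp only [List.headD_cons] at ht; simp [pvLead1, ht]
      rw [hl0]
      simp

/-- transition pairing equals the recursive run decomposition. -/
theorem pvZip_eq_runs : ∀ (rest : List Int) (x p : Int), p ≠ 1 →
    List.zip (pvStartsRec p x rest) (pvEndsRec x rest) = pvRunsRec rest x := by
  intro rest
  induction hn : rest.length using Nat.strong_induction_on generalizing rest with
  | _ k ih =>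
  intro x p hp
  match rest with
  | [] => simp [pvStartsRec, pvEndsRec, pvRunsRec]
  | v :: t =>
    by_cases hv : v = 1
    · subst hv
      have hl : pvLead1 ((1 : Int) :: t) = pvLead1 t + 1 := by simp [pvLead1]
      rw [pvRunsRec]
      simp only [show ((1 : Int) == 1) = true from rfl, dite_true]
      rw [pvStartsRec]
      have hc : (((1:Int) == 1) && !(p == 1)) = true := by simp [hp]
      rw [hc]
      simp only [if_true]
      rw [pvEndsRec_run ((1:Int) :: t) x (by simp)]
      rw [List.zip_cons_cons]
      congr 1
      rw [pvStartsRec_run t (x + 1)]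
      have hd : ((1 : Int) :: t).drop (pvLead1 ((1:Int) :: t)) = t.drop (pvLead1 t) := by
        rw [hl, List.drop_succ_cons]
      rw [hd]
      have hx : x + 1 + (pvLead1 t : Int) = x + (pvLead1 ((1:Int) :: t) : Int) := by
        rw [hl]; push_cast; ring
      rw [hx]
      rw [pvStartsRec_state 1 0 _ _ (pvLead1_drop_head t)]
      have hlt : (t.drop (pvLead1 t)).length < k := by subst hn; simp
      exact ih _ hlt _ rfl _ 0 (by norm_num)
    · have hv' : (v == 1) = false := by simp [hv]
      rw [pvRunsRec]
      simp only [hv', Bool.false_eq_true, dite_false]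
      rw [pvStartsRec, pvEndsRec]
      have hc1 : ((v == 1) && !(p == 1)) = false := by simp [hv]
      have hc2 : ((v == 1) && !((t.headD 0) == 1)) = false := by simp [hv]
      rw [hc1, hc2]
      simp only [Bool.false_eq_true, if_false]
      have hlt : t.length < k := by subst hn; simp
      exact ih _ hlt _ rfl _ v hv

/-- B's per-row zip of boundary lists = the recursive runs. -/
theorem pvRow_runs (row : List Int) :
    List.zip (pvStarts row) (pvEnds row) = pvRunsRec row 0 := by
  unfold pvStarts pvEnds
  rw [PySem.List.slice_from_one]
  rw [pvStarts_gen 0 row 0, pvEnds_gen row 0]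
  exact pvZip_eq_runs row 0 0 (by norm_num)

/-- all runs of the bitmap, as (y, start, end) triples, rows in order. -/
def pvAllRuns (y : Int) : List (List Int) → List (Int × Int × Int)
  | [] => []
  | row :: rows => (pvRunsRec row 0).map (fun se => (y, se.1, se.2)) ++ pvAllRuns (y + 1) rows

/-- A's bitmap fold = insert all runs with a running counter. -/
theorem pvAFold_eq : ∀ (bitmap : List (List Int)) (y rid : Int)
    (acc : PySem.Dict Int (List (List (String × Int)))),
    bitmap.foldl
      (fun (st : Int × Int × PySem.Dict Int (List (List (String × Int)))) row =>
        let (rid', acc') := pvAScan st.1 row 0 st.2.1 st.2.2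
        (st.1 + 1, rid', acc')) (y, rid, acc) =
    (y + bitmap.length, pvInsRuns (rid, acc) (pvAllRuns y bitmap)) := by
  intro bitmap
  induction bitmap with
  | nil => intro y rid acc; simp [pvAllRuns, pvInsRuns]
  | cons row rows ih =>
    intro y rid acc
    simp only [List.foldl_cons]
    rw [pvAScan_eq]
    have := ih (y + 1) (pvInsRuns (rid, acc) ((pvRunsRec row 0).map (fun se => (y, se.1, se.2)))).1
      (pvInsRuns (rid, acc) ((pvRunsRec row 0).map (fun se => (y, se.1, se.2)))).2
    rw [this]
    rw [pvAllRuns]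
    unfold pvInsRuns
    rw [List.foldl_append]
    simp only [List.length_cons, Prod.mk.injEq]
    refine ⟨by push_cast; ring, trivial⟩

/-- B's runs-collecting fold accumulates pvAllRuns. -/
theorem pvBRuns_eq : ∀ (bitmap : List (List Int)) (y : Int)
    (pre : List (Int × Int × Int)),
    (PySem.List.enumerate bitmap y).foldl
      (fun acc p =>
        acc ++ (List.zip (pvStarts p.2) (pvEnds p.2)).map (fun se => (p.1, se.1, se.2))) pre =
    pre ++ pvAllRuns y bitmap := by
  intro bitmap
  induction bitmap with
  | nil => intro y pre; simp [PySem.List.enumerate, pvAllRuns]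
  | cons row rows ih =>
    intro y pre
    rw [PySem.List.enumerate_cons, List.foldl_cons, ih, pvAllRuns, pvRow_runs, List.append_assoc]

/-- the counter fold = the enumerate fold. -/
theorem pvInsRuns_enum : ∀ (rs : List (Int × Int × Int)) (rid : Int)
    (acc : PySem.Dict Int (List (List (String × Int)))),
    pvInsRuns (rid, acc) rs =
      (rid + rs.length,
       (PySem.List.enumerate rs rid).foldl (fun d q => d.insert q.1 (pvRect3 q.2)) acc) := by
  intro rs
  induction rs with
  | nil => intro rid acc; simp [pvInsRuns, PySem.List.enumerate]
  | cons r rs' ih =>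
    intro rid acc
    rw [PySem.List.enumerate_cons]
    unfold pvInsRuns
    rw [List.foldl_cons, List.foldl_cons]
    have := ih (rid + 1) (acc.insert rid (pvRect3 r))
    unfold pvInsRuns at this
    rw [this]
    simp only [List.length_cons, Prod.mk.injEq]
    refine ⟨by push_cast; ring, trivial⟩

-- ===== VERDICT (by name: the statement is the Claim_ definition above) =====
theorem get_ractangle_spec : Claim_equal_get_ractangle := by
  intro bitmap method _
  unfold Spec_get_ractangle get_ractangle get_ractangle_alt
  rw [pvAFold_eq, pvBRuns_eq, List.nil_append, pvInsRuns_enum]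
  congr 1
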